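-- pv_equiv track=rewrite | github.com/Vagacoder/Codesignal | python/Arcade/Python/P09MexFunction.py | mexFunction
-- ===== SOURCE A (Python) =====
-- def mexFunction(s:list, upperBound:int)-> int:
--     found = -1
--     for i in range(upperBound):
--         if not i in s:
--             found = i
--             break
--     else:
--         return upperBound
--
--     return found
-- ===== SOURCE B (Python) =====
-- def mexFunction(s: list, upperBound: int) -> int:
--     candidate = 0
--     for x in sorted(set(s)):
--         if candidate >= upperBound:
--             break
--         if x < candidate:
--             continue
--         if x == candidate:
--             candidate += 1
--         else:
--             break
--     return candidate if candidate < upperBound else upperBound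
-- ===== Notes on version B (the rewrite author's own statement) =====
-- stated objective: faster
-- what changed: Instead of testing each integer 0..upperBound-1 against the list with a linear 'in' scan, B sorts the distinct values once and walks them with a single advancing candidate counter.
import Mathlib
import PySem

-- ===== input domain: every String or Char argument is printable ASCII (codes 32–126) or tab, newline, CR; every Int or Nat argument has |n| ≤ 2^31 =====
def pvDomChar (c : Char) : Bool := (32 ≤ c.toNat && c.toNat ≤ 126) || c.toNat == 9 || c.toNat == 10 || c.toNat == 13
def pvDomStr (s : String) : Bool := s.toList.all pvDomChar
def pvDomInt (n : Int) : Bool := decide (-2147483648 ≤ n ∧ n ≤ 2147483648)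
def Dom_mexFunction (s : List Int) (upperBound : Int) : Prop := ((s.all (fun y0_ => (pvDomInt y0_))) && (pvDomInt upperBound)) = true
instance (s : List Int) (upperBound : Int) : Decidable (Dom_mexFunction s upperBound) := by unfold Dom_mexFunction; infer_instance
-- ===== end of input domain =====

-- B replaces A's scan of 0..upperBound-1 (each probing the list with 'in') by one walk
-- over the sorted distinct values with an advancing candidate counter (objective: faster).

-- ===== PORT A =====
-- the 'for i in range(upperBound)' loop over the counter i: 'some i' = break with found = i, 'none' = for-else
def mexLoopA (s : List Int) (ub i : Int) : Option Int :=
  if h : i < ub then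
    if i ∈ s then mexLoopA s ub (i + 1) else some i
  else none
termination_by (ub - i).toNat
decreasing_by omega

def mexFunction (s : List Int) (upperBound : Int) : Int :=
  match mexLoopA s upperBound 0 with
  | some found => found
  | none => upperBound

-- ===== PORT B =====
-- the 'for x in sorted(set(s))' loop of Source B with its breaks/continue
def mexLoopB (ub c : Int) : List Int → Int
  | [] => c
  | x :: rest =>
    if c ≥ ub then c
    else if x < c then mexLoopB ub c rest
    else if x = c then mexLoopB ub (c + 1) rest
    else c

def mexFunction_alt (s : List Int) (upperBound : Int) : Int :=
  let vals := PySem.List.sorted (PySem.Set.ofList s) (fun x => x) false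
  let candidate := mexLoopB upperBound 0 vals
  if candidate < upperBound then candidate else upperBound

-- ===== PRECONDITION & SPEC =====
def Spec_mexFunction (s : List Int) (upperBound : Int) (out : Int) : Prop := out = mexFunction_alt s upperBound
instance (s : List Int) (upperBound : Int) (out : Int) : Decidable (Spec_mexFunction s upperBound out) := by unfold Spec_mexFunction; infer_instance

-- ===== CLAIM (what is proved, stated in full; the proofs are below) =====
def Claim_equal_mexFunction : Prop := ∀ (s : List Int) (upperBound : Int), Dom_mexFunction s upperBound → Spec_mexFunction s upperBound (mexFunction s upperBound)

-- ===== LEMMAS AND PROOFS =====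

-- If every integer in [a, ub) lies in s, A's loop falls through to the for-else.
theorem mexLoopA_none (s : List Int) (ub : Int) :
    ∀ (n : Nat) (a : Int), (ub - a).toNat = n → (∀ k, a ≤ k → k < ub → k ∈ s) →
      mexLoopA s ub a = none := by
  intro n
  induction n with
  | zero =>
    intro a hn _
    rw [mexLoopA.eq_def, dif_neg (show ¬ a < ub by omega)]
  | succ n ih =>
    intro a hn hk
    have hab : a < ub := by omega
    rw [mexLoopA.eq_def, dif_pos hab, if_pos (hk a le_rfl hab)]
    exact ih (a + 1) (by omega) (fun k h1 h2 => hk k (by omega) h2)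

-- If r is the least element ≥ a not in s, and r < ub, A's loop breaks at r.
theorem mexLoopA_some (s : List Int) (ub r : Int) :
    ∀ (n : Nat) (a : Int), (ub - a).toNat = n → a ≤ r → r < ub →
      (∀ k, a ≤ k → k < r → k ∈ s) → r ∉ s →
      mexLoopA s ub a = some r := by
  intro n
  induction n with
  | zero => intro a hn har hrub _ _; omega
  | succ n ih =>
    intro a hn har hrub hk hr
    have hab : a < ub := by omega
    rw [mexLoopA.eq_def, dif_pos hab]
    by_cases hae : a = r
    · subst hae
      rw [if_neg hr]
    · have halt : a < r := lt_of_le_of_ne har hae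
      rw [if_pos (hk a le_rfl halt)]
      exact ih (a + 1) (by omega) (by omega) hrub (fun k h1 h2 => hk k (by omega) h2) hr

-- Characterisation of B's loop over a strictly increasing list L:
-- the result r satisfies c ≤ r, every integer in [c, r) is in L, and if r < ub then r ∉ L.
theorem mexLoopB_char (ub : Int) :
    ∀ (L : List Int) (c : Int), L.Pairwise (· < ·) →
      c ≤ mexLoopB ub c L ∧ (∀ k, c ≤ k → k < mexLoopB ub c L → k ∈ L) ∧
        (mexLoopB ub c L < ub → mexLoopB ub c L ∉ L) := by
  intro L
  induction L with
  | nil =>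
    intro c _
    refine ⟨le_rfl, fun k h1 h2 => absurd h2 (by simp [mexLoopB] at *; omega), by simp⟩
  | cons x rest ih =>
    intro c hp
    obtain ⟨hx, hrest⟩ := List.pairwise_cons.mp hp
    by_cases h1 : c ≥ ub
    · simp only [mexLoopB, if_pos h1]
      exact ⟨le_rfl, fun k hk1 hk2 => absurd hk2 (by omega), fun h => absurd h (by omega)⟩
    · by_cases h2 : x < c
      · obtain ⟨ha, hb, hc⟩ := ih c hrest
        simp only [mexLoopB, if_neg h1, if_pos h2]
        refine ⟨ha, fun k hk1 hk2 => List.mem_cons_of_mem _ (hb k hk1 hk2), fun hlt hmem => ?_⟩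
        rcases List.mem_cons.mp hmem with h | h
        · omega
        · exact hc hlt h
      · by_cases h3 : x = c
        · obtain ⟨ha, hb, hc⟩ := ih (c + 1) hrest
          simp only [mexLoopB, if_neg h1, if_neg h2, if_pos h3]
          refine ⟨by omega, fun k hk1 hk2 => ?_, fun hlt hmem => ?_⟩
          · by_cases hkc : k = c
            · exact hkc ▸ h3 ▸ List.mem_cons_self
            · exact List.mem_cons_of_mem _ (hb k (by omega) hk2)
          · rcases List.mem_cons.mp hmem with h | h
            · omega
            · exact hc hlt h
        · simp only [mexLoopB, if_neg h1, if_neg h2, if_neg h3]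
          refine ⟨le_rfl, fun k hk1 hk2 => absurd hk2 (by omega), fun _ hmem => ?_⟩
          rcases List.mem_cons.mp hmem with h | h
          · omega
          · have := hx _ h; omega

theorem mexFunction_eq_alt (s : List Int) (ub : Int) :
    mexFunction s ub = mexFunction_alt s ub := by
  have hp : (PySem.List.sorted (PySem.Set.ofList s) (fun x => x) false).Pairwise (· < ·) :=
    PySem.List.sorted_ofList_pairwise_lt s
  set L := PySem.List.sorted (PySem.Set.ofList s) (fun x => x) false with hL
  have hmem : ∀ k : Int, k ∈ L ↔ k ∈ s := by
    intro k
    rw [hL, PySem.List.mem_sorted, PySem.Set.mem_ofList]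
  obtain ⟨h1, h2, h3⟩ := mexLoopB_char ub L 0 hp
  set r := mexLoopB ub 0 L with hr
  simp only [mexFunction, mexFunction_alt, ← hL, ← hr]
  by_cases hcase : r < ub
  · rw [mexLoopA_some s ub r (ub - 0).toNat 0 rfl h1 hcase
      (fun k hk1 hk2 => (hmem k).1 (h2 k hk1 hk2))
      (fun hmemr => h3 hcase ((hmem r).2 hmemr))]
    rw [if_pos hcase]
  · rw [mexLoopA_none s ub (ub - 0).toNat 0 rfl
      (fun k hk1 hk2 => (hmem k).1 (h2 k hk1 (by omega)))]
    rw [if_neg hcase]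

-- ===== VERDICT (by name: the statement is the Claim_ definition above) =====
theorem mexFunction_spec : Claim_equal_mexFunction := by
  intro s ub _
  unfold Spec_mexFunction
  exact mexFunction_eq_alt s ub
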